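-- pv_equiv track=rewrite | github.com/levhyun/PythonDatabaseWorkbench | Mapper.py | selectCommandSet
-- ===== SOURCE A (Python) =====
-- def selectCommandSet(command):
--     optionList = ['','','']
--     temp = ""
--     cnt = 0
--     for i in command:
--         if i != '[' and i != ']':
--             temp += i
--         if i == ']':
--             optionList[cnt] = temp
--             cnt += 1
--             temp = ""
--     return optionList[0], optionList[1], optionList[2]
-- ===== SOURCE B (Python) =====
-- def selectCommandSet(command):
--     parts = [seg.replace('[', '') for seg in command.split(']')[:-1]]
--     parts += [''] * (3 - len(parts))
--     return parts[0], parts[1], parts[2]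
-- ===== Notes on version B (the rewrite author's own statement) =====
-- stated objective: simpler
-- what changed: Replaces the character-by-character accumulator loop with a write counter by split-on-']' plus a per-segment replace('[',''), padded to three entries.
import Mathlib
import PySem

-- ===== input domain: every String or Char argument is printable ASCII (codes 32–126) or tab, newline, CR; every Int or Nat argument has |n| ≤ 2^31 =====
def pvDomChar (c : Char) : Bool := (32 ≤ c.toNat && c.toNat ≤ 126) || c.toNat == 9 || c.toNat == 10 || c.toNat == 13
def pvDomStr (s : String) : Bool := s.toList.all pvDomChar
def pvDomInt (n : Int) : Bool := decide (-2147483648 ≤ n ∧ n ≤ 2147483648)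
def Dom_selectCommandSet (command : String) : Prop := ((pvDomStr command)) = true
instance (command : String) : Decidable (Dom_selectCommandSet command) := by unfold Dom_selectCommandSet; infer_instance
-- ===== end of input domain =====

-- B is simpler: it splits the command on ']' and cleans each bracketed segment with replace('[',''), instead of A's character-by-character accumulator loop with a write counter.

-- ===== PORT A =====
def selectCommandSet (command : String) : String × String × String :=
  -- optionList[cnt] = temp raises IndexError when cnt ≥ 3 (excluded by Pre_); List.set is a no-op there
  let st := command.toList.foldl
    (fun (s : List String × String × Nat) i =>
      let optionList := s.1
      let temp := s.2.1
      let cnt := s.2.2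
      let temp := if i ≠ '[' ∧ i ≠ ']' then temp.push i else temp
      if i = ']' then (optionList.set cnt temp, "", cnt + 1)
      else (optionList, temp, cnt))
    (["", "", ""], "", 0)
  -- optionList[0], optionList[1], optionList[2]: the list always has length 3 here, so indexing never raises
  (PySem.List.pyGetD st.1 0 "", PySem.List.pyGetD st.1 1 "", PySem.List.pyGetD st.1 2 "")

-- ===== PORT B =====
def selectCommandSet_alt (command : String) : String × String × String :=
  -- command.split(']')[:-1]: the separator "]" is nonempty, so split? is always `some`
  let segs := PySem.List.slice ((PySem.Str.split? command "]").getD []) none (some (-1))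
  let parts := segs.map (fun seg => PySem.Str.replace seg "[" "")
  -- parts += [''] * (3 - len(parts)): a non-positive repeat count gives [], exactly as Nat subtraction does
  let parts := parts ++ List.replicate (3 - parts.length) ""
  -- parts has length ≥ 3 here, so parts[0..2] never raise
  (PySem.List.pyGetD parts 0 "", PySem.List.pyGetD parts 1 "", PySem.List.pyGetD parts 2 "")

-- ===== PRECONDITION & SPEC =====
-- Pre_ excludes commands with more than three ']' characters: there A assigns into a
-- fixed length-3 list at index 3 and raises IndexError (returns nothing).
def Pre_selectCommandSet (command : String) : Prop := command.toList.count ']' ≤ 3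
instance (command : String) : Decidable (Pre_selectCommandSet command) := by
  unfold Pre_selectCommandSet; infer_instance
def pvWitness_selectCommandSet : String := "[a][bb][c] tail"

def Spec_selectCommandSet (command : String) (out : String × String × String) : Prop :=
  out = selectCommandSet_alt command
instance (command : String) (out : String × String × String) : Decidable (Spec_selectCommandSet command out) := by
  unfold Spec_selectCommandSet; infer_instance

-- ===== CLAIM (what is proved, stated in full; the proofs are below) =====
def Claim_equal_selectCommandSet : Prop := ∀ (command : String), Dom_selectCommandSet command → Pre_selectCommandSet command → Spec_selectCommandSet command (selectCommandSet command)

-- ===== LEMMAS AND PROOFS =====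

/-- The ']'-split of a character list (Python `split(']')` on the code points). -/
def splitChar : List Char → List (List Char)
  | [] => [[]]
  | c :: rest => if c = ']' then [] :: splitChar rest else (splitChar rest).modifyHead (c :: ·)

lemma splitChar_ne_nil (cs : List Char) : splitChar cs ≠ [] := by
  cases cs with
  | nil => simp [splitChar]
  | cons c rest =>
    simp only [splitChar]
    split
    · simp
    · cases h : splitChar rest with
      | nil => exact absurd h (splitChar_ne_nil rest)
      | cons p ps => simp [List.modifyHead]

lemma length_splitChar (cs : List Char) : (splitChar cs).length = cs.count ']' + 1 := by
  induction cs with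
  | nil => simp [splitChar]
  | cons c rest ih =>
    simp only [splitChar]
    split <;> rename_i h <;> simp [h, ih]

/-- State of A's loop after consuming `cs` from accumulator `temp`:
    the list of values written on each ']' and the leftover accumulator. -/
def pieces : List Char → String → List String × String
  | [], temp => ([], temp)
  | c :: rest, temp =>
    if c = ']' then
      let p := pieces rest ""
      (temp :: p.1, p.2)
    else pieces rest (if c = '[' then temp else temp.push c)

/-- Write values into a list at consecutive indices. -/
def writeAll : List String → Nat → List String → List String
  | lst, _, [] => lst
  | lst, i, v :: vs => writeAll (lst.set i v) (i + 1) vs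

lemma foldA (cs : List Char) : ∀ (lst : List String) (temp : String) (cnt : Nat),
    cs.foldl
      (fun (s : List String × String × Nat) i =>
        let optionList := s.1
        let temp := s.2.1
        let cnt := s.2.2
        let temp := if i ≠ '[' ∧ i ≠ ']' then temp.push i else temp
        if i = ']' then (optionList.set cnt temp, "", cnt + 1)
        else (optionList, temp, cnt))
      (lst, temp, cnt)
      = (writeAll lst cnt (pieces cs temp).1, (pieces cs temp).2, cnt + (pieces cs temp).1.length) := by
  induction cs with
  | nil => intro lst temp cnt; simp [pieces, writeAll]
  | cons c rest ih =>
    intro lst temp cnt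
    by_cases hc : c = ']'
    · subst hc
      simp only [List.foldl_cons, pieces]
      simp only [ne_eq, not_true_eq_false, and_false, if_false]
      rw [ih]
      simp [writeAll]
      omega
    · by_cases hb : c = '['
      · subst hb
        simp only [List.foldl_cons, pieces]
        simp only [ne_eq, not_true_eq_false, false_and, if_false, if_neg (by decide : ¬('[' = ']'))]
        rw [ih]
        simp
      · simp only [List.foldl_cons, pieces, if_neg hc, if_neg hb]
        simp only [ne_eq, hb, hc, not_false_eq_true, and_true, if_true]
        rw [ih]

/-- A segment with all '[' removed, as a string. -/
def cleanStr (p : List Char) : String := String.ofList (p.filter (fun c => c ≠ '['))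

/-- Prefix the first element of a list of strings. -/
def prefixFirst (t : String) : List String → List String
  | [] => []
  | x :: xs => (t ++ x) :: xs

lemma prefixFirst_empty (l : List String) : prefixFirst "" l = l := by
  cases l <;> simp [prefixFirst]

lemma prefixFirst_cons (t : String) (x : String) (xs : List String) :
    prefixFirst t (x :: xs) = (t ++ x) :: xs := rfl

lemma push_append_ofList (t : String) (c : Char) (l : List Char) :
    t.push c ++ String.ofList l = t ++ String.ofList (c :: l) := by
  apply String.ext; simp

lemma head_merge (temp : String) (c : Char) (p : List Char) :
    (if c = '[' then temp else temp.push c) ++ cleanStr p = temp ++ cleanStr (c :: p) := by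
  by_cases hb : c = '['
  · subst hb; simp [cleanStr]
  · rw [if_neg hb]
    have hf : (c :: p).filter (fun c => c ≠ '[') = c :: p.filter (fun c => c ≠ '[') := by
      simp [hb]
    simp only [cleanStr, hf]
    exact push_append_ofList temp c _

lemma pieces_eq (cs : List Char) : ∀ temp,
    (pieces cs temp).1 = prefixFirst temp ((splitChar cs).dropLast.map cleanStr) := by
  induction cs with
  | nil => intro temp; simp [pieces, splitChar, prefixFirst]
  | cons c rest ih =>
    intro temp
    obtain ⟨p, ps, h⟩ : ∃ p ps, splitChar rest = p :: ps := by
      cases h : splitChar rest with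
      | nil => exact absurd h (splitChar_ne_nil rest)
      | cons p ps => exact ⟨p, ps, rfl⟩
    by_cases hc : c = ']'
    · subst hc
      simp [pieces, splitChar, h, ih "", prefixFirst_empty, prefixFirst_cons,
        List.dropLast_cons_of_ne_nil (List.cons_ne_nil p ps), cleanStr]
    · simp only [pieces, if_neg hc, splitChar, h, List.modifyHead]
      rw [ih, h]
      cases ps with
      | nil => simp [prefixFirst]
      | cons q qs =>
        simp only [List.dropLast_cons_of_ne_nil (List.cons_ne_nil q qs),
          List.map_cons, prefixFirst]
        rw [head_merge]

lemma go_split (cs : List Char) : ∀ (fuel : Nat) (cur : List Char) (acc : List (List Char)),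
    cs.length < fuel →
    PySem.Chars.splitOn.go [']'] fuel cs cur acc
      = acc.reverse ++ (splitChar cs).modifyHead (cur.reverse ++ ·) := by
  induction cs with
  | nil =>
    intro fuel cur acc h
    cases fuel with
    | zero => omega
    | succ n => simp [PySem.Chars.splitOn.go, splitChar, List.modifyHead]
  | cons c rest ih =>
    intro fuel cur acc h
    cases fuel with
    | zero => omega
    | succ n =>
      by_cases hc : c = ']'
      · subst hc
        rw [show PySem.Chars.splitOn.go [']'] (n+1) (']' :: rest) cur acc
            = PySem.Chars.splitOn.go [']'] n rest [] (cur.reverse :: acc) from by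
          simp [PySem.Chars.splitOn.go, List.isPrefixOf]]
        rw [ih n [] (cur.reverse :: acc) (by simpa using h)]
        obtain ⟨p, ps, hs⟩ : ∃ p ps, splitChar rest = p :: ps := by
          cases hs : splitChar rest with
          | nil => exact absurd hs (splitChar_ne_nil rest)
          | cons p ps => exact ⟨p, ps, rfl⟩
        simp [splitChar, hs, List.modifyHead]
      · rw [show PySem.Chars.splitOn.go [']'] (n+1) (c :: rest) cur acc
            = PySem.Chars.splitOn.go [']'] n rest (c :: cur) acc from by
          simp [PySem.Chars.splitOn.go, List.isPrefixOf, Ne.symm hc]]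
        rw [ih n (c :: cur) acc (by simpa using h)]
        obtain ⟨p, ps, hs⟩ : ∃ p ps, splitChar rest = p :: ps := by
          cases hs : splitChar rest with
          | nil => exact absurd hs (splitChar_ne_nil rest)
          | cons p ps => exact ⟨p, ps, rfl⟩
        simp [splitChar, hs, List.modifyHead, if_neg hc]

lemma splitOn_eq (cs : List Char) : PySem.Chars.splitOn cs [']'] = splitChar cs := by
  rw [show PySem.Chars.splitOn cs [']'] = PySem.Chars.splitOn.go [']'] (cs.length + 1) cs [] [] from rfl]
  rw [go_split cs (cs.length + 1) [] [] (Nat.lt_succ_self _)]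
  obtain ⟨p, ps, hs⟩ : ∃ p ps, splitChar cs = p :: ps := by
    cases hs : splitChar cs with
    | nil => exact absurd hs (splitChar_ne_nil cs)
    | cons p ps => exact ⟨p, ps, rfl⟩
  simp [hs, List.modifyHead]

lemma go_replace (l : List Char) : ∀ (fuel : Nat) (acc : List Char),
    l.length ≤ fuel →
    PySem.Chars.replace.go ['['] [] fuel l acc = acc.reverse ++ l.filter (fun c => c ≠ '[') := by
  induction l with
  | nil =>
    intro fuel acc h
    cases fuel with
    | zero => simp [PySem.Chars.replace.go]
    | succ n => simp [PySem.Chars.replace.go]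
  | cons c t ih =>
    intro fuel acc h
    cases fuel with
    | zero => simp at h
    | succ n =>
      by_cases hb : c = '['
      · subst hb
        rw [show PySem.Chars.replace.go ['['] [] (n+1) ('[' :: t) acc
            = PySem.Chars.replace.go ['['] [] n t acc from by
          simp [PySem.Chars.replace.go, List.isPrefixOf]]
        rw [ih n acc (by simpa using h)]
        simp
      · rw [show PySem.Chars.replace.go ['['] [] (n+1) (c :: t) acc
            = PySem.Chars.replace.go ['['] [] n t (c :: acc) from by
          simp [PySem.Chars.replace.go, List.isPrefixOf, Ne.symm hb]]
        rw [ih n (c :: acc) (by simpa using h)]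
        simp [hb]

lemma replace_clean (p : List Char) :
    PySem.Str.replace (String.ofList p) "[" "" = cleanStr p := by
  apply String.ext
  rw [PySem.Str.toList_replace]
  rw [show ("[" : String).toList = ['['] from rfl, show ("" : String).toList = [] from rfl]
  rw [show PySem.Chars.replace (String.ofList p).toList ['['] []
      = PySem.Chars.replace.go ['['] [] (String.ofList p).toList.length (String.ofList p).toList [] from by
    simp [PySem.Chars.replace]]
  rw [go_replace _ _ _ (Nat.le_refl _)]
  simp [cleanStr]

lemma split_getD (command : String) :
    (PySem.Str.split? command "]").getD [] = (splitChar command.toList).map String.ofList := by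
  have h := PySem.Str.split?_map command "]"
  rw [show ("]" : String).toList = [']'] from rfl] at h
  rw [PySem.Chars.split?] at h
  simp only [List.isEmpty_cons, if_false, Bool.false_eq_true] at h
  cases hs : PySem.Str.split? command "]" with
  | none => rw [hs] at h; simp at h
  | some L =>
    rw [hs] at h
    simp only [Option.map_some, Option.some_inj] at h
    rw [Option.getD_some]
    calc L = (L.map String.toList).map String.ofList := by
            simp [List.map_map, Function.comp_def, String.ofList_toList]
      _ = (splitChar command.toList).map String.ofList := by rw [h, splitOn_eq]

lemma slice_neg_one {α : Type} (xs : List α) :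
    PySem.List.slice xs none (some (-1)) = xs.dropLast := by
  cases xs with
  | nil => rfl
  | cons x t =>
    have h0 : ¬((t.length : Int) < 0) := by omega
    simp [PySem.List.slice, PySem.List.clampIdx, List.dropLast_eq_take, h0]

lemma finalTriple (ws : List String) (h : ws.length ≤ 3) :
    (PySem.List.pyGetD (writeAll ["", "", ""] 0 ws) 0 "",
     PySem.List.pyGetD (writeAll ["", "", ""] 0 ws) 1 "",
     PySem.List.pyGetD (writeAll ["", "", ""] 0 ws) 2 "")
    = (PySem.List.pyGetD (ws ++ List.replicate (3 - ws.length) "") 0 "",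
       PySem.List.pyGetD (ws ++ List.replicate (3 - ws.length) "") 1 "",
       PySem.List.pyGetD (ws ++ List.replicate (3 - ws.length) "") 2 "") := by
  match ws with
  | [] => rfl
  | [a] => rfl
  | [a, b] => rfl
  | [a, b, c] => rfl
  | a :: b :: c :: d :: rest => simp only [List.length_cons] at h; omega

theorem selectCommandSet_spec : Claim_equal_selectCommandSet := by
  intro command _ hpre
  unfold Pre_selectCommandSet at hpre
  unfold Spec_selectCommandSet selectCommandSet selectCommandSet_alt
  simp only [split_getD, slice_neg_one, foldA]
  rw [pieces_eq, prefixFirst_empty]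
  rw [← List.map_dropLast, List.map_map]
  have hcomp : ((fun seg => PySem.Str.replace seg "[" "") ∘ String.ofList) = cleanStr := by
    funext p; exact replace_clean p
  rw [hcomp]
  have hlen : ((splitChar command.toList).dropLast.map cleanStr).length ≤ 3 := by
    have := length_splitChar command.toList
    simp only [List.length_map, List.length_dropLast, this]
    omega
  exact finalTriple _ hlen
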